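-- pv_equiv track=rewrite | github.com/joniekwon/cote_study | 이것이 코딩 테스트다/구현/예제2 시각.py | solution
-- ===== SOURCE A (Python) =====
-- def solution(N):
--     count = 0
--
--     for h in range(N+1):
--         #h시
--         for m in range(60):
--             #m분
--             for s in range(60):
--                 #s초
--                 if (str(N) in str(h)) or (str(N) in str(m)) or (str(N) in str(s)):
--                     count+=1
--     return count
-- ===== SOURCE B (Python) =====
-- def solution(N):
--     t = str(N)
--     M = sum(1 for m in range(60) if t in str(m))
--     H = sum(1 for h in range(N + 1) if t in str(h))
--     per_miss = 3600 - (60 - M) * (60 - M)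
--     return H * 3600 + (max(N + 1, 0) - H) * per_miss
-- ===== Notes on version B (the rewrite author's own statement) =====
-- stated objective: faster
-- what changed: Replaced the triple h/m/s loop by a closed formula: count minute-matches M and hour-matches H once, then combine by inclusion-exclusion over the 60x60 minute/second grid.
import Mathlib
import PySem

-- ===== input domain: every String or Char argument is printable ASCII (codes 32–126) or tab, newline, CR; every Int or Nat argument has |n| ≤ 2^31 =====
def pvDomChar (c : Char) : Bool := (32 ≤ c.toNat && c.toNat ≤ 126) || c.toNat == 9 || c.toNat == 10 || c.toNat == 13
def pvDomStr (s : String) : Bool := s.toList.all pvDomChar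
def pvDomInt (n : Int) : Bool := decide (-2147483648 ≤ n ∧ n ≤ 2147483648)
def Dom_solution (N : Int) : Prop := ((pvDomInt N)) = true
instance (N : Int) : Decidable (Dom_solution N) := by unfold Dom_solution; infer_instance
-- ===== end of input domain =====

-- B replaces A's triple nested loop by two linear counts (per-minute matches M, per-hour
-- matches H) combined by inclusion-exclusion over the 60x60 minute/second grid;
-- objective: faster (removes the quadratic inner work per hour).

-- ===== PORT A =====
def solution (N : Int) : Int :=
  (PySem.List.pyRange 0 (N + 1) 1).foldl (fun count h =>
    (PySem.List.pyRange 0 60 1).foldl (fun count _m =>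
      (PySem.List.pyRange 0 60 1).foldl (fun count s =>
        if PySem.Str.isIn (PySem.Int.toStr N) (PySem.Int.toStr h)
            || PySem.Str.isIn (PySem.Int.toStr N) (PySem.Int.toStr _m)
            || PySem.Str.isIn (PySem.Int.toStr N) (PySem.Int.toStr s)
        then count + 1 else count) count) count) 0

-- ===== PORT B =====
def solution_alt (N : Int) : Int :=
  let t := PySem.Int.toStr N
  let M : Int := (((PySem.List.pyRange 0 60 1).filter
      (fun m => PySem.Str.isIn t (PySem.Int.toStr m))).length : Int)
  let H : Int := (((PySem.List.pyRange 0 (N + 1) 1).filter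
      (fun h => PySem.Str.isIn t (PySem.Int.toStr h))).length : Int)
  let perMiss := 3600 - (60 - M) * (60 - M)
  H * 3600 + (max (N + 1) 0 - H) * perMiss

-- ===== PRECONDITION & SPEC =====
def Spec_solution (N : Int) (out : Int) : Prop := out = solution_alt N
instance (N : Int) (out : Int) : Decidable (Spec_solution N out) := by unfold Spec_solution; infer_instance

-- ===== CLAIM (what is proved, stated in full; the proofs are below) =====
def Claim_equal_solution : Prop := ∀ (N : Int), Dom_solution N → Spec_solution N (solution N)

-- ===== LEMMAS AND PROOFS =====

-- counting fold = filter length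
theorem pv_foldl_count (q : Int → Bool) (L : List Int) (c : Int) :
    L.foldl (fun c x => if q x then c + 1 else c) c
      = c + ((L.filter q).length : Int) := by
  induction L generalizing c with
  | nil => simp
  | cons a L ih =>
    simp only [List.foldl_cons, List.filter_cons]
    by_cases hq : q a = true
    · simp [hq, ih]; ring
    · simp [hq, ih]

-- additive fold = sum of mapped values
theorem pv_foldl_addf (f : Int → Int) (L : List Int) (c : Int) :
    L.foldl (fun c x => c + f x) c = c + (L.map f).sum := by
  induction L generalizing c with
  | nil => simp
  | cons a L ih => simp [ih]; ring

-- sum of a two-valued map, split by the predicate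
theorem pv_sum_if (q : Int → Bool) (L : List Int) (A B : Int) :
    (L.map (fun x => if q x then A else B)).sum
      = ((L.filter q).length : Int) * A
        + ((L.length : Int) - ((L.filter q).length : Int)) * B := by
  induction L with
  | nil => simp
  | cons a L ih =>
    simp only [List.map_cons, List.sum_cons, List.filter_cons, List.length_cons]
    by_cases hq : q a = true
    · simp [hq, ih]; ring
    · simp [hq, ih]; ring

-- the two inner loops of A, for one fixed hour h, evaluate to a closed value
theorem pv_inner (P : Int → Bool) (h : Int) (c : Int) :
    (PySem.List.pyRange 0 60 1).foldl (fun count m =>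
      (PySem.List.pyRange 0 60 1).foldl (fun count s =>
        if P h || P m || P s then count + 1 else count) count) c
      = c + (if P h
             then 3600
             else
               (((PySem.List.pyRange 0 60 1).filter P).length : Int) * 60
                 + (60 - (((PySem.List.pyRange 0 60 1).filter P).length : Int))
                     * (((PySem.List.pyRange 0 60 1).filter P).length : Int)) := by
  have hstep : (fun (count : Int) (m : Int) =>
      (PySem.List.pyRange 0 60 1).foldl (fun count s =>
        if P h || P m || P s then count + 1 else count) count)
      = (fun (count : Int) (m : Int) =>
          count + (if P h || P m
                   then 60
                   else (((PySem.List.pyRange 0 60 1).filter P).length : Int))) := by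
    funext c m
    rw [pv_foldl_count (fun s => P h || P m || P s)]
    by_cases hb : (P h || P m) = true
    · rcases Bool.or_eq_true_iff.mp hb with hb' | hb' <;>
        simp [hb']
    · have h1 : P h = false := by
        cases hPh : P h <;> simp_all
      have h2 : P m = false := by
        cases hPm : P m <;> simp_all
      simp [h1, h2]
  rw [hstep, pv_foldl_addf]
  by_cases hPh : P h = true
  · have : (fun m => if P h || P m then (60 : Int)
        else (((PySem.List.pyRange 0 60 1).filter P).length : Int))
        = fun _ => (60 : Int) := by funext m; simp [hPh]
    rw [this]
    simp [hPh]
  · have h1 : P h = false := by cases hp : P h <;> simp_all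
    have : (fun m => if P h || P m then (60 : Int)
        else (((PySem.List.pyRange 0 60 1).filter P).length : Int))
        = fun m => if P m then (60 : Int)
            else (((PySem.List.pyRange 0 60 1).filter P).length : Int) := by
      funext m; simp [h1]
    rw [this, pv_sum_if P]
    simp [h1]

theorem pv_lenRange (N : Int) :
    (((PySem.List.pyRange 0 (N + 1) 1).length : Int)) = max (N + 1) 0 := by
  rw [PySem.List.length_pyRange_one]
  omega

-- ===== VERDICT (by name: the statement is the Claim_ definition above) =====
theorem solution_spec : Claim_equal_solution := by
  intro N _
  unfold Spec_solution solution solution_alt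
  set t := PySem.Int.toStr N with ht
  set P : Int → Bool := fun x => PySem.Str.isIn t (PySem.Int.toStr x) with hP
  set M : Int := (((PySem.List.pyRange 0 60 1).filter P).length : Int) with hM
  set H : Int := (((PySem.List.pyRange 0 (N + 1) 1).filter P).length : Int) with hH
  have hout : (fun (count h : Int) =>
      (PySem.List.pyRange 0 60 1).foldl (fun count m =>
        (PySem.List.pyRange 0 60 1).foldl (fun count s =>
          if P h || P m || P s then count + 1 else count) count) count)
      = fun (count h : Int) =>
          count + (if P h then 3600 else M * 60 + (60 - M) * M) := by
    funext c h
    rw [pv_inner P h c]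
  show (PySem.List.pyRange 0 (N + 1) 1).foldl (fun count h =>
      (PySem.List.pyRange 0 60 1).foldl (fun count m =>
        (PySem.List.pyRange 0 60 1).foldl (fun count s =>
          if P h || P m || P s then count + 1 else count) count) count) 0 = _
  rw [hout, pv_foldl_addf, pv_sum_if P, pv_lenRange N]
  show (0 : Int) + (H * 3600 + (max (N + 1) 0 - H) * (M * 60 + (60 - M) * M))
      = H * 3600 + (max (N + 1) 0 - H) * (3600 - (60 - M) * (60 - M))
  ring
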